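-- pv_equiv track=rewrite | github.com/zhangcheng1006/Kernel_Method_Data_Challenge | kernels.py | within_gap
-- ===== SOURCE A (Python) =====
-- def within_gap(x, y, m=5):
--     '''Check if two strings are within gap of size m. Utilised in substring kernel
--     '''
--     l = len(x)
--     for i in range(m):
--         sub_x = x[i:l-m+i+1]
--         for j in range(m):
--             sub_y = y[j:l-m+j+1]
--             if sub_x == sub_y:
--                 return True
--     return False
-- ===== SOURCE B (Python) =====
-- def within_gap(x, y, m=5):
--     '''Check if two strings are within gap of size m. Utilised in substring kernel
--     '''
--     w = len(x) - m + 1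
--     seen_x, seen_y = set(), set()
--     for k in range(m):
--         sub_x, sub_y = x[k:k + w], y[k:k + w]
--         seen_x.add(sub_x)
--         seen_y.add(sub_y)
--         if sub_x in seen_y or sub_y in seen_x:
--             return True
--     return False
-- ===== Notes on version B (the rewrite author's own statement) =====
-- stated objective: alternative
-- what changed: B replaces A's nested pairwise scan with a single interleaved pass: one loop over k that accumulates the x-windows and y-windows seen so far in two sets and returns True as soon as a cross match appears, eliminating the inner loop.
import Mathlib
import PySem

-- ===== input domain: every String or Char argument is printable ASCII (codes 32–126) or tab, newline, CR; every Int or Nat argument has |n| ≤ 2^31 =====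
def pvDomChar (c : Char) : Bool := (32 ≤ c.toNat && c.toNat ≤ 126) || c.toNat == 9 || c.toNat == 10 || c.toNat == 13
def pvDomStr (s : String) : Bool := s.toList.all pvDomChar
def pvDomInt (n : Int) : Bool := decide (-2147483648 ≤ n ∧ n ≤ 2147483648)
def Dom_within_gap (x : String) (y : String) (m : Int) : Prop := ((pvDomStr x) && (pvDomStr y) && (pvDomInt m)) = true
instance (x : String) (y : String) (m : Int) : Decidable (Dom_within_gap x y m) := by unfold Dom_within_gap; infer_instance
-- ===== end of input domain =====

-- B replaces A's nested scans with one interleaved pass keeping two set accumulators and exiting on the first cross match (alternative algorithm).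


-- ===== PORT A =====
-- nested scan: for each i, compare x-window against every y-window
def within_gap (x : String) (y : String) (m : Int) : Bool :=
  let l : Int := PySem.Str.len x
  (PySem.List.pyRange 0 m 1).any (fun i =>
    let sub_x := PySem.Str.slice x (some i) (some (l - m + i + 1))
    (PySem.List.pyRange 0 m 1).any (fun j =>
      let sub_y := PySem.Str.slice y (some j) (some (l - m + j + 1))
      sub_x == sub_y))

-- ===== PORT B =====
-- the loop body of Source B: at step k, add both windows to the accumulators and
-- return true on a cross match; fuel = number of remaining iterations of range(m)
def wgLoop (x : String) (y : String) (w : Int)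
    (seenX seenY : PySem.Set String) (k : Int) : Nat → Bool
  | 0 => false
  | f + 1 =>
    let sub_x := PySem.Str.slice x (some k) (some (k + w))
    let sub_y := PySem.Str.slice y (some k) (some (k + w))
    let seenX' := PySem.Set.add seenX sub_x
    let seenY' := PySem.Set.add seenY sub_y
    if PySem.Set.contains seenY' sub_x || PySem.Set.contains seenX' sub_y then true
    else wgLoop x y w seenX' seenY' (k + 1) f

def within_gap_alt (x : String) (y : String) (m : Int) : Bool :=
  let w : Int := PySem.Str.len x - m + 1
  wgLoop x y w PySem.Set.empty PySem.Set.empty 0 m.toNat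

-- ===== PRECONDITION & SPEC =====
def Spec_within_gap (x : String) (y : String) (m : Int) (out : Bool) : Prop := out = within_gap_alt x y m
instance (x : String) (y : String) (m : Int) (out : Bool) : Decidable (Spec_within_gap x y m out) := by unfold Spec_within_gap; infer_instance

-- ===== CLAIM (what is proved, stated in full; the proofs are below) =====
def Claim_equal_within_gap : Prop := ∀ (x : String) (y : String) (m : Int), Dom_within_gap x y m → Spec_within_gap x y m (within_gap x y m)

-- ===== LEMMAS AND PROOFS =====

-- loop invariant: with the accumulators holding exactly the windows of index < k,
-- the loop fires iff some step t in [k, k+f) sees a cross match with an index ≤ t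
theorem wgLoop_iff (x y : String) (w : Int) (f : Nat) :
    ∀ (k : Int) (seenX seenY : PySem.Set String),
    0 ≤ k →
    (∀ s, s ∈ seenX ↔ ∃ i : Int, 0 ≤ i ∧ i < k ∧ s = PySem.Str.slice x (some i) (some (i + w))) →
    (∀ s, s ∈ seenY ↔ ∃ j : Int, 0 ≤ j ∧ j < k ∧ s = PySem.Str.slice y (some j) (some (j + w))) →
    (wgLoop x y w seenX seenY k f = true ↔
      ∃ t : Int, k ≤ t ∧ t < k + f ∧
        ((∃ j : Int, 0 ≤ j ∧ j ≤ t ∧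
            PySem.Str.slice x (some t) (some (t + w)) = PySem.Str.slice y (some j) (some (j + w))) ∨
         (∃ i : Int, 0 ≤ i ∧ i ≤ t ∧
            PySem.Str.slice y (some t) (some (t + w)) = PySem.Str.slice x (some i) (some (i + w))))) := by
  induction f with
  | zero =>
    intro k seenX seenY hk hX hY
    simp only [wgLoop]
    constructor
    · intro h; exact absurd h (by simp)
    · rintro ⟨t, h1, h2, _⟩; omega
  | succ f ih =>
    intro k seenX seenY hk hX hY
    simp only [wgLoop]
    set sub_x := PySem.Str.slice x (some k) (some (k + w)) with hsx
    set sub_y := PySem.Str.slice y (some k) (some (k + w)) with hsy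
    have hX' : ∀ s, s ∈ PySem.Set.add seenX sub_x ↔
        ∃ i : Int, 0 ≤ i ∧ i < k + 1 ∧ s = PySem.Str.slice x (some i) (some (i + w)) := by
      intro s
      rw [PySem.Set.mem_add, hX s]
      constructor
      · rintro (⟨i, h0, h1, rfl⟩ | rfl)
        · exact ⟨i, h0, by omega, rfl⟩
        · exact ⟨k, hk, by omega, rfl⟩
      · rintro ⟨i, h0, h1, rfl⟩
        by_cases hik : i = k
        · subst hik; exact Or.inr rfl
        · exact Or.inl ⟨i, h0, by omega, rfl⟩
    have hY' : ∀ s, s ∈ PySem.Set.add seenY sub_y ↔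
        ∃ j : Int, 0 ≤ j ∧ j < k + 1 ∧ s = PySem.Str.slice y (some j) (some (j + w)) := by
      intro s
      rw [PySem.Set.mem_add, hY s]
      constructor
      · rintro (⟨j, h0, h1, rfl⟩ | rfl)
        · exact ⟨j, h0, by omega, rfl⟩
        · exact ⟨k, hk, by omega, rfl⟩
      · rintro ⟨j, h0, h1, rfl⟩
        by_cases hjk : j = k
        · subst hjk; exact Or.inr rfl
        · exact Or.inl ⟨j, h0, by omega, rfl⟩
    have hcond : (PySem.Set.contains (PySem.Set.add seenY sub_y) sub_x ||
                  PySem.Set.contains (PySem.Set.add seenX sub_x) sub_y) = true ↔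
        ((∃ j : Int, 0 ≤ j ∧ j ≤ k ∧
            sub_x = PySem.Str.slice y (some j) (some (j + w))) ∨
         (∃ i : Int, 0 ≤ i ∧ i ≤ k ∧
            sub_y = PySem.Str.slice x (some i) (some (i + w)))) := by
      rw [Bool.or_eq_true, PySem.Set.contains_iff, PySem.Set.contains_iff, hY' sub_x, hX' sub_y]
      constructor
      · rintro (⟨j, h0, h1, h2⟩ | ⟨i, h0, h1, h2⟩)
        · exact Or.inl ⟨j, h0, by omega, h2⟩
        · exact Or.inr ⟨i, h0, by omega, h2⟩
      · rintro (⟨j, h0, h1, h2⟩ | ⟨i, h0, h1, h2⟩)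
        · exact Or.inl ⟨j, h0, by omega, h2⟩
        · exact Or.inr ⟨i, h0, by omega, h2⟩
    by_cases hc : (PySem.Set.contains (PySem.Set.add seenY sub_y) sub_x ||
                   PySem.Set.contains (PySem.Set.add seenX sub_x) sub_y) = true
    · rw [if_pos hc]
      constructor
      · intro _
        exact ⟨k, le_refl k, by omega, hcond.mp hc⟩
      · intro _; rfl
    · rw [if_neg hc]
      rw [ih (k + 1) _ _ (by omega) hX' hY']
      have hnotk := (not_iff_not.mpr hcond).mp hc
      constructor
      · rintro ⟨t, h1, h2, h3⟩
        exact ⟨t, by omega, by push_cast at h2 ⊢; omega, h3⟩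
      · rintro ⟨t, h1, h2, h3⟩
        by_cases htk : t = k
        · subst htk; exact absurd h3 hnotk
        · exact ⟨t, by omega, by push_cast at h2 ⊢; omega, h3⟩

-- ===== VERDICT (by name: the statement is the Claim_ definition above) =====
theorem within_gap_spec : Claim_equal_within_gap := by
  intro x y m _
  unfold Spec_within_gap within_gap within_gap_alt
  set l : Int := PySem.Str.len x with hl
  have hempty : ∀ s : String, s ∈ (PySem.Set.empty : PySem.Set String) ↔
      ∃ i : Int, 0 ≤ i ∧ i < 0 ∧ s = PySem.Str.slice x (some i) (some (i + (l - m + 1))) := by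
    intro s
    simp only [PySem.Set.empty]
    constructor
    · intro h; exact absurd h (List.not_mem_nil)
    · rintro ⟨i, h0, h1, _⟩; omega
  have hempty' : ∀ s : String, s ∈ (PySem.Set.empty : PySem.Set String) ↔
      ∃ j : Int, 0 ≤ j ∧ j < 0 ∧ s = PySem.Str.slice y (some j) (some (j + (l - m + 1))) := by
    intro s
    simp only [PySem.Set.empty]
    constructor
    · intro h; exact absurd h (List.not_mem_nil)
    · rintro ⟨j, h0, h1, _⟩; omega
  rw [Bool.eq_iff_iff,
    wgLoop_iff x y (l - m + 1) m.toNat 0 PySem.Set.empty PySem.Set.empty (le_refl 0) hempty hempty']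
  simp only [List.any_eq_true, PySem.List.mem_pyRange_one, beq_iff_eq, zero_add]
  constructor
  · rintro ⟨i, ⟨hi0, hi1⟩, j, ⟨hj0, hj1⟩, h⟩
    have hm : 0 < m := by omega
    have hco : l - m + i + 1 = i + (l - m + 1) := by ring
    have hco' : l - m + j + 1 = j + (l - m + 1) := by ring
    rw [hco, hco'] at h
    by_cases hij : j ≤ i
    · refine ⟨i, hi0, by omega, Or.inl ⟨j, hj0, hij, h⟩⟩
    · refine ⟨j, hj0, by omega, Or.inr ⟨i, hi0, by omega, h.symm⟩⟩
  · rintro ⟨t, ht0, ht1, h⟩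
    have htm : t < m := by omega
    rcases h with ⟨j, hj0, hj1, h⟩ | ⟨i, hi0, hi1, h⟩
    · refine ⟨t, ⟨ht0, htm⟩, j, ⟨hj0, by omega⟩, ?_⟩
      rw [show l - m + t + 1 = t + (l - m + 1) by ring, show l - m + j + 1 = j + (l - m + 1) by ring]
      exact h
    · refine ⟨i, ⟨hi0, by omega⟩, t, ⟨ht0, htm⟩, ?_⟩
      rw [show l - m + i + 1 = i + (l - m + 1) by ring, show l - m + t + 1 = t + (l - m + 1) by ring]
      exact h.symm
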